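-- pv_equiv track=rewrite | github.com/cmc9595/ACM-Study-2021 | 2주차/cmc/3_튜플.py | solution
-- ===== SOURCE A (Python) =====
-- def solution(s):
--     answer = []
--     s = s.split('}')
--     s = ' '.join(s).split()  # 공원소 제거
--
--     for i in range(len(s)):
--         s[i] = list(map(int, s[i][2:].split(',')))
--     s = sorted(s, key=lambda x: len(x))  # 길이별로 정렬 1, 2, 3, ..., n
--
--     answer.append(s[0][0])
--     for i in range(len(s) - 1):
--         answer.append(list(set(s[i + 1]) - set(s[i]))[0])
--     return answer
-- ===== SOURCE B (Python) =====
-- from collections import Counter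
--
-- def solution(s):
--     tokens = ' '.join(s.split('}')).split()
--     sets = [list(map(int, t[2:].split(','))) for t in tokens]
--     cnt = Counter(x for l in sets for x in l)
--     # an element appearing in k of the n tuples-prefixes sits at position n-k:
--     # order the distinct elements by decreasing frequency
--     return sorted(cnt, key=lambda x: -cnt[x])
-- ===== Notes on version B (the rewrite author's own statement) =====
-- stated objective: idiomatic
-- what changed: Instead of sorting the parsed sets by length and taking repeated set differences between consecutive sets, B builds one Counter over all parsed elements and orders the distinct elements by decreasing frequency.
-- outside the precondition, e.g. on solution('{{1},{2,3}}'): A returns [1, 2], B returns [1, 2, 3]; on solution('{{2,2,1},{1}}'): A returns [1, 2], B returns [2, 1]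
import Mathlib
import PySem

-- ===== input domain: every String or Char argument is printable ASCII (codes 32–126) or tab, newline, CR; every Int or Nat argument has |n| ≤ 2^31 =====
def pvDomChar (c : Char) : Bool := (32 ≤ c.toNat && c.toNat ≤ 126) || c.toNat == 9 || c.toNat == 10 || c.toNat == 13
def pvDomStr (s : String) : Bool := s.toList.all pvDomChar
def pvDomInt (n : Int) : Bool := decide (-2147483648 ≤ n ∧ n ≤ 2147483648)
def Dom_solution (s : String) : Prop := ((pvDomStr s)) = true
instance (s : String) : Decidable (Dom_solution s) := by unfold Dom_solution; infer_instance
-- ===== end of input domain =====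

-- B replaces A's sort-by-length + consecutive set differences by one frequency count
-- of all parsed elements, ordered by decreasing frequency (objective: idiomatic).

-- shared parsing front end (identical in Source A and Source B):
-- ' '.join(s.split('}')).split(), then for each token int-parse token[2:].split(',');
-- none = some int(...) raised ValueError
def parseSets (s : String) : Option (List (List Int)) :=
  (PySem.Chars.split₀ (PySem.Chars.join [' '] (PySem.Chars.splitOn s.toList "}".toList))).mapM
    (fun t => (PySem.Chars.splitOn (PySem.List.slice t (some 2) none) ",".toList).mapM PySem.Int.ofChars?)

-- ===== PORT A =====
-- for i in range(len(s)-1): answer.append(list(set(s[i+1]) - set(s[i]))[0]),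
-- as the obvious recursion over adjacent pairs; headD 0 stands for [0] (the empty-diff
-- IndexError case is excluded by Pre_)
def diffLoop (prev : List Int) : List (List Int) → List Int
  | [] => []
  | l :: rest => (PySem.Set.diff (PySem.Set.ofList l) (PySem.Set.ofList prev)).headD 0 :: diffLoop l rest

def solution (s : String) : List Int :=
  match parseSets s with
  | none => []              -- ValueError: outside Pre_
  | some ls =>
    match PySem.List.sorted ls (fun x => x.length) with
    | [] => []              -- s[0] IndexError: outside Pre_
    | l0 :: rest => l0.headD 0 :: diffLoop l0 rest   -- s[0][0] IndexError excluded by Pre_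

-- ===== PORT B =====
def solution_alt (s : String) : List Int :=
  match parseSets s with
  | none => []              -- ValueError: outside Pre_
  | some ls =>
    let cnt := PySem.Dict.counter ls.flatten
    PySem.List.sorted cnt.keys (fun x => -(cnt.getD x 0))

-- ===== PRECONDITION & SPEC =====
-- the tail of the length-sorted parse is a chain: each set is duplicate-free, one
-- element larger than, and a superset of, its predecessor
def chainFrom (prev : List Int) : List (List Int) → Bool
  | [] => true
  | l :: rest => decide l.Nodup && (l.length == prev.length + 1)
      && PySem.Set.issubset (PySem.Set.ofList prev) (PySem.Set.ofList l) && chainFrom l rest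

def goodChain : List (List Int) → Bool
  | [] => false
  | l :: rest => (l.length == 1) && chainFrom l rest

-- Pre_ excludes inputs that do not parse (A raises ValueError), whose parsed sets are
-- not a strict size-1..n chain (A either raises IndexError on an empty difference, or
-- returns a value that depends on CPython's hash-based set-iteration order over a
-- multi-element difference), or whose parsed lists contain duplicates (A's and B's
-- orders on such ties are both accidental).
def Pre_solution (s : String) : Prop :=
  ((parseSets s).map (fun ls => goodChain (PySem.List.sorted ls (fun x => x.length)))).getD false = true
instance (s : String) : Decidable (Pre_solution s) := by unfold Pre_solution; infer_instance

def pvWitness_solution : String := "{{5},{5,123456789}}"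

def Spec_solution (s : String) (out : List Int) : Prop := out = solution_alt s
instance (s : String) (out : List Int) : Decidable (Spec_solution s out) := by unfold Spec_solution; infer_instance

-- ===== CLAIM (what is proved, stated in full; the proofs are below) =====
def Claim_equal_solution : Prop := ∀ (s : String), Dom_solution s → Pre_solution s → Spec_solution s (solution s)

-- ===== LEMMAS AND PROOFS =====

-- number of sets of u that contain x
def countIn (u : List (List Int)) (x : Int) : Nat := u.countP (fun l => decide (x ∈ l))

lemma chain_nodup (prev : List Int) (rest : List (List Int)) (h : chainFrom prev rest = true) :
    ∀ l ∈ rest, l.Nodup := by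
  induction rest generalizing prev with
  | nil => simp
  | cons l rest ih =>
    simp only [chainFrom, Bool.and_eq_true, decide_eq_true_eq] at h
    intro m hm
    rcases List.mem_cons.mp hm with rfl | hm'
    · exact h.1.1.1
    · exact ih l h.2 m hm'

lemma chain_mem_later (prev : List Int) (rest : List (List Int)) (h : chainFrom prev rest = true)
    (x : Int) (hx : x ∈ prev) : ∀ l ∈ rest, x ∈ l := by
  induction rest generalizing prev with
  | nil => simp
  | cons l rest ih =>
    simp only [chainFrom, Bool.and_eq_true] at h
    have hsub := (PySem.Set.issubset_iff _ _).mp h.1.2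
    have hxl : x ∈ l := (PySem.Set.mem_ofList l x).mp
      (hsub x ((PySem.Set.mem_ofList prev x).mpr hx))
    intro m hm
    rcases List.mem_cons.mp hm with rfl | hm'
    · exact hxl
    · exact ih l h.2 hxl m hm'

lemma diff_singleton (prev l : List Int) (hndp : prev.Nodup) (hndl : l.Nodup)
    (hsub : ∀ x ∈ prev, x ∈ l) (hlen : l.length = prev.length + 1) :
    ∃ a, PySem.Set.diff (PySem.Set.ofList l) (PySem.Set.ofList prev) = [a] ∧ a ∈ l ∧ a ∉ prev
      ∧ l.Perm (prev ++ [a]) := by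
  have hol : PySem.Set.ofList l = l := PySem.Set.ofList_eq_self_of_nodup l hndl
  have hop : PySem.Set.ofList prev = prev := PySem.Set.ofList_eq_self_of_nodup prev hndp
  have hd : PySem.Set.diff (PySem.Set.ofList l) (PySem.Set.ofList prev)
      = l.filter (fun x => !prev.contains x) := by
    rw [hol, hop]; rfl
  have hperm := List.filter_append_perm (fun x => prev.contains x) l
  have hf1 : (l.filter (fun x => prev.contains x)).Perm prev := by
    rw [List.perm_ext_iff_of_nodup (hndl.filter _) hndp]
    intro a
    simp only [List.mem_filter, List.contains_iff_mem]
    exact ⟨fun h => h.2, fun h => ⟨hsub a h, h⟩⟩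
  have hlen2 : (l.filter (fun x => !prev.contains x)).length = 1 := by
    have h1 := hperm.length_eq
    have h2 := hf1.length_eq
    simp only [List.length_append] at h1
    omega
  obtain ⟨a, ha⟩ : ∃ a, l.filter (fun x => !prev.contains x) = [a] := by
    cases hf : l.filter (fun x => !prev.contains x) with
    | nil => rw [hf] at hlen2; simp at hlen2
    | cons a t => rw [hf] at hlen2; simp at hlen2; exact ⟨a, by rw [hlen2]⟩
  refine ⟨a, by rw [hd, ha], ?_, ?_, ?_⟩
  · have := List.mem_filter.mp (ha ▸ List.mem_cons_self (a := a) (l := []))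
    exact this.1
  · have := List.mem_filter.mp (ha ▸ List.mem_cons_self (a := a) (l := []))
    simpa [List.contains_iff_mem] using this.2
  · have h3 : (List.filter (fun x => prev.contains x) l ++ [a]).Perm (prev ++ [a]) :=
      hf1.append_right [a]
    exact (hperm.symm.trans (by rw [ha])).trans h3

-- diffLoop collects exactly the elements the chain adds: the last set is prev plus them
-- destructed form of one chain step
lemma chain_step (prev l : List Int) (rest : List (List Int))
    (h : chainFrom prev (l :: rest) = true) :
    l.Nodup ∧ l.length = prev.length + 1 ∧ (∀ x ∈ prev, x ∈ l) ∧ chainFrom l rest = true := by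
  simp only [chainFrom, Bool.and_eq_true, decide_eq_true_eq, beq_iff_eq] at h
  exact ⟨h.1.1.1, h.1.1.2, fun x hx => (PySem.Set.mem_ofList l x).mp
    ((PySem.Set.issubset_iff _ _).mp h.1.2 x ((PySem.Set.mem_ofList prev x).mpr hx)), h.2⟩

lemma diffLoop_perm (prev : List Int) (rest : List (List Int)) (hnd : prev.Nodup)
    (h : chainFrom prev rest = true) :
    (rest.getLastD prev).Perm (prev ++ diffLoop prev rest) := by
  induction rest generalizing prev with
  | nil => simp [diffLoop]
  | cons l rest ih =>
    obtain ⟨hndl, hlen, hsub, hch⟩ := chain_step prev l rest h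
    obtain ⟨a, hda, hal, hanp, hlperm⟩ := diff_singleton prev l hnd hndl hsub hlen
    rw [List.getLastD_cons]
    show (rest.getLastD l).Perm (prev ++ ((PySem.Set.diff _ _).headD 0 :: diffLoop l rest))
    rw [hda]
    have h2 : (l ++ diffLoop l rest).Perm (prev ++ [a].headD 0 :: diffLoop l rest) := by
      have := hlperm.append_right (diffLoop l rest)
      simpa using this
    exact (ih l hndl hch).trans h2

lemma diffLoop_length (prev : List Int) (rest : List (List Int)) :
    (diffLoop prev rest).length = rest.length := by
  induction rest generalizing prev with
  | nil => rfl
  | cons l rest ih => simp [diffLoop, ih]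

lemma diffLoop_not_mem_prev (prev : List Int) (rest : List (List Int)) (hnd : prev.Nodup)
    (h : chainFrom prev rest = true) : ∀ b ∈ diffLoop prev rest, b ∉ prev := by
  induction rest generalizing prev with
  | nil => simp [diffLoop]
  | cons l rest ih =>
    obtain ⟨hndl, hlen, hsub, hch⟩ := chain_step prev l rest h
    obtain ⟨a, hda, hal, hanp, -⟩ := diff_singleton prev l hnd hndl hsub hlen
    intro b hb
    simp only [diffLoop, hda, List.headD_cons] at hb
    rcases List.mem_cons.mp hb with rfl | hb'
    · exact hanp
    · intro hbp; exact ih l hndl hch b hb' (hsub b hbp)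

lemma countIn_of_mem (prev : List Int) (rest : List (List Int)) (h : chainFrom prev rest = true)
    (x : Int) (hx : x ∈ prev) : countIn (prev :: rest) x = rest.length + 1 := by
  have hall := chain_mem_later prev rest h x hx
  simp only [countIn, List.countP_cons, decide_eq_true_eq, hx, if_pos]
  have : rest.countP (fun l => decide (x ∈ l)) = rest.length := by
    rw [List.countP_eq_length]
    intro l hl; exact decide_eq_true (hall l hl)
  omega

lemma diffLoop_counts (prev : List Int) (rest : List (List Int)) (hnd : prev.Nodup)
    (h : chainFrom prev rest = true) :
    ∀ j (hj : j < (diffLoop prev rest).length),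
      countIn (prev :: rest) ((diffLoop prev rest)[j]) = rest.length - j := by
  induction rest generalizing prev with
  | nil => simp [diffLoop]
  | cons l rest ih =>
    obtain ⟨hndl, hlen, hsub, hch⟩ := chain_step prev l rest h
    obtain ⟨a, hda, hal, hanp, -⟩ := diff_singleton prev l hnd hndl hsub hlen
    intro j hj
    simp only [diffLoop, hda, List.headD_cons] at hj ⊢
    cases j with
    | zero =>
      simp only [List.getElem_cons_zero]
      have h1 := countIn_of_mem l rest hch a hal
      have h2 : countIn (prev :: l :: rest) a = countIn (l :: rest) a := by
        simp [countIn, List.countP_cons, hanp]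
      rw [h2, h1]; simp
    | succ j =>
      simp only [List.getElem_cons_succ]
      have hj' : j < (diffLoop l rest).length := by
        simpa using Nat.lt_of_succ_lt_succ (by simpa using hj)
      have hb := ih l hndl hch j hj'
      have hbl : (diffLoop l rest)[j] ∉ l :=
        diffLoop_not_mem_prev l rest hndl hch _ (List.getElem_mem hj')
      have hbp : (diffLoop l rest)[j] ∉ prev := fun hc => hbl (hsub _ hc)
      have h2 : countIn (prev :: l :: rest) ((diffLoop l rest)[j])
          = countIn (l :: rest) ((diffLoop l rest)[j]) := by
        simp [countIn, List.countP_cons, hbp]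
      rw [h2, hb]
      rw [diffLoop_length] at hj'
      simp only [List.length_cons]
      omega

-- every element of any set of the chain is in the last set
lemma chain_subset_last (prev : List Int) (rest : List (List Int)) (h : chainFrom prev rest = true) :
    ∀ l ∈ (prev :: rest), ∀ x ∈ l, x ∈ rest.getLastD prev := by
  induction rest generalizing prev with
  | nil =>
    intro l hl x hx
    rcases List.mem_cons.mp hl with rfl | hl'
    · simpa using hx
    · simp at hl'
  | cons l rest ih =>
    obtain ⟨hndl, hlen, hsub, hch⟩ := chain_step prev l rest h
    intro m hm x hx
    rw [List.getLastD_cons]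
    rcases List.mem_cons.mp hm with rfl | hm'
    · exact ih l hch l List.mem_cons_self x (hsub x hx)
    · exact ih l hch m hm' x hx

lemma last_mem (prev : List Int) (rest : List (List Int)) :
    rest.getLastD prev ∈ prev :: rest := by
  induction rest generalizing prev with
  | nil => simp
  | cons l rest ih =>
    rw [List.getLastD_cons]
    exact List.mem_cons_of_mem _ (ih l)

-- count of x in the flattened lists = number of lists containing x, when all lists are nodup
lemma count_flatten_eq_countIn (ls : List (List Int)) (hnd : ∀ l ∈ ls, l.Nodup) (x : Int) :
    ls.flatten.count x = countIn ls x := by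
  induction ls with
  | nil => rfl
  | cons l ls ih =>
    have hl := hnd l (List.mem_cons_self)
    have ihl := ih (fun m hm => hnd m (List.mem_cons_of_mem _ hm))
    simp only [List.flatten_cons, List.count_append, countIn, List.countP_cons, ihl]
    by_cases hx : x ∈ l
    · rw [List.count_eq_one_of_mem hl hx]; simp [hx]; omega
    · rw [List.count_eq_zero_of_not_mem hx]; simp [hx]

-- the core equivalence, stated on the parsed lists
lemma main_eq (s : String) (ls : List (List Int)) (hp : parseSets s = some ls)
    (hg : goodChain (PySem.List.sorted ls (fun x => x.length)) = true) :
    solution s = solution_alt s := by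
  unfold solution solution_alt
  rw [hp]
  show (match PySem.List.sorted ls (fun x => x.length) with
        | [] => []
        | l0 :: rest => l0.headD 0 :: diffLoop l0 rest)
      = PySem.List.sorted (PySem.Dict.counter ls.flatten).keys
          (fun x => -((PySem.Dict.counter ls.flatten).getD x 0))
  cases hu : PySem.List.sorted ls (fun x => x.length) with
  | nil => rw [hu] at hg; simp [goodChain] at hg
  | cons l0 rest =>
    rw [hu] at hg
    simp only [goodChain, Bool.and_eq_true, beq_iff_eq] at hg
    obtain ⟨hlen1, hchain⟩ := hg
    obtain ⟨a0, rfl⟩ : ∃ a0, l0 = [a0] := by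
      cases l0 with
      | nil => simp at hlen1
      | cons a t =>
        simp only [List.length_cons] at hlen1
        have ht : t = [] := List.length_eq_zero_iff.mp (by omega)
        exact ⟨a, by rw [ht]⟩
    have hperm_u : (([a0] : List Int) :: rest).Perm ls := hu ▸ PySem.List.sorted_perm ls _ _
    have hnd_all : ∀ l ∈ ls, l.Nodup := by
      intro l hl
      rcases List.mem_cons.mp (hperm_u.mem_iff.mpr hl) with rfl | h
      · simp
      · exact chain_nodup [a0] rest hchain l h
    -- the key is minus the number of chain sets containing x
    have hkey : ∀ x : Int, (PySem.Dict.counter ls.flatten).getD x 0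
        = (countIn ([a0] :: rest) x : Int) := by
      intro x
      rw [PySem.Dict.getD_counter]
      have h1 : ls.flatten.count x = countIn ([a0] :: rest) x := by
        rw [count_flatten_eq_countIn ls hnd_all x]
        exact (hperm_u.countP_eq _).symm
      exact_mod_cast congrArg (Nat.cast : Nat → Int) h1
    -- A's answer, with its per-position counts
    have hdlen : (diffLoop [a0] rest).length = rest.length := diffLoop_length [a0] rest
    have hv : ∀ k (hk : k < (a0 :: diffLoop [a0] rest).length),
        countIn ([a0] :: rest) ((a0 :: diffLoop [a0] rest)[k]) = rest.length + 1 - k := by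
      intro k hk
      cases k with
      | zero =>
        simpa using countIn_of_mem [a0] rest hchain a0 (by simp)
      | succ k =>
        have hk' : k < (diffLoop [a0] rest).length := by
          simp only [List.length_cons] at hk; omega
        have := diffLoop_counts [a0] rest (by simp) hchain k hk'
        simp only [List.getElem_cons_succ, this]
        omega
    have hpair : List.Pairwise
        (fun a b => (fun x => -((PySem.Dict.counter ls.flatten).getD x 0)) a
                  < (fun x => -((PySem.Dict.counter ls.flatten).getD x 0)) b)
        (a0 :: diffLoop [a0] rest) := by
      rw [List.pairwise_iff_getElem]
      intro i j hi hj hij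
      simp only [hkey, neg_lt_neg_iff, Nat.cast_lt]
      rw [hv i hi, hv j hj]
      simp only [List.length_cons, hdlen] at hj
      omega
    -- A's answer is a permutation of the distinct elements
    have h1 : (rest.getLastD [a0]).Perm ([a0] ++ diffLoop [a0] rest) :=
      diffLoop_perm [a0] rest (by simp) hchain
    have hnd_last : (rest.getLastD [a0]).Nodup := by
      rcases List.mem_cons.mp (last_mem [a0] rest) with h | h
      · rw [h]; simp
      · exact chain_nodup [a0] rest hchain _ h
    have h2 : (rest.getLastD [a0]).Perm (PySem.Set.ofList ls.flatten) := by
      rw [List.perm_ext_iff_of_nodup hnd_last (PySem.Set.nodup_ofList _)]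
      intro x
      rw [PySem.Set.mem_ofList, List.mem_flatten]
      constructor
      · intro hx
        exact ⟨rest.getLastD [a0], hperm_u.mem_iff.mp (last_mem [a0] rest), hx⟩
      · rintro ⟨m, hm, hx⟩
        exact chain_subset_last [a0] rest hchain m (hperm_u.mem_iff.mpr hm) x hx
    have hperm : (a0 :: diffLoop [a0] rest).Perm (PySem.Dict.counter ls.flatten).keys := by
      rw [PySem.Dict.keys_counter]
      exact ((List.singleton_append (x := a0) (l := diffLoop [a0] rest)) ▸ h1.symm).trans h2
    exact (PySem.List.sorted_eq_of_perm_of_pairwise_lt _ _ _ hperm hpair).symm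

-- ===== VERDICT (by name: the statement is the Claim_ definition above) =====
theorem solution_spec : Claim_equal_solution := by
  intro s _ hpre
  unfold Pre_solution at hpre
  unfold Spec_solution
  cases hp : parseSets s with
  | none => rw [hp] at hpre; simp at hpre
  | some ls =>
    rw [hp] at hpre; simp only [Option.map_some, Option.getD_some] at hpre
    exact main_eq s ls hp hpre
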